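-- pv_equiv track=rewrite | github.com/pcuste1/ProjectEuler | prob32.py | inList
-- ===== SOURCE A (Python) =====
-- def inList(strnum):
--     numList =  ['1','2','3','4','5','6','7','8','9']
--     for c in strnum:
--          if c in numList:
--              numList.remove(c)
--          else:
--              return False
--     return True
-- ===== SOURCE B (Python) =====
-- def inList(strnum):
--     chars = set(strnum)
--     return chars <= set('123456789') and len(chars) == len(strnum)
-- ===== Notes on version B (the rewrite author's own statement) =====
-- stated objective: simpler
-- what changed: Replaces the early-return loop that mutates a list of remaining digits with two aggregate checks on set(strnum): subset of set('123456789') and no duplicates via a length comparison.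
import Mathlib
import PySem

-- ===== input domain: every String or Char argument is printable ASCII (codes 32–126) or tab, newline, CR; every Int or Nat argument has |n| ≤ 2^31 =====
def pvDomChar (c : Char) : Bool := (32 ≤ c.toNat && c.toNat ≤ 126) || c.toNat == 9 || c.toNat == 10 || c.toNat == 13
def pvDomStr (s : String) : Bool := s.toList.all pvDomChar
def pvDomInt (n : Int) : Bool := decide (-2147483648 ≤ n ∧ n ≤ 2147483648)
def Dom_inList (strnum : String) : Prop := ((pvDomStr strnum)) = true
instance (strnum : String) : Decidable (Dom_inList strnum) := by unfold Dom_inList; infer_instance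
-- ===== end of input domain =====

-- B replaces A's mutating early-return loop with two aggregate checks on set(strnum)
-- (subset of the digit set, and no duplicates via a length comparison): simpler, no mutation.

-- ===== PORT A =====
-- the for-loop over strnum with the mutable numList; 'numList.remove(c)' is guarded by
-- 'c in numList', so PySem.List.remove? is totalised with getD (the default is never used)
def inListLoopA : List Char → List Char → Bool
  | [], _ => true
  | c :: rest, numList =>
    if numList.contains c then
      inListLoopA rest ((PySem.List.remove? numList c).getD numList)
    else false

def inList (strnum : String) : Bool :=
  inListLoopA strnum.toList ['1','2','3','4','5','6','7','8','9']

-- ===== PORT B =====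
def inList_alt (strnum : String) : Bool :=
  let chars : PySem.Set Char := PySem.Set.ofList strnum.toList
  PySem.Set.issubset chars (PySem.Set.ofList "123456789".toList) &&
    (PySem.Set.len chars == PySem.Str.len strnum)

-- ===== PRECONDITION & SPEC =====
def Spec_inList (strnum : String) (out : Bool) : Prop := out = inList_alt strnum
instance (strnum : String) (out : Bool) : Decidable (Spec_inList strnum out) := by unfold Spec_inList; infer_instance

-- ===== CLAIM (what is proved, stated in full; the proofs are below) =====
def Claim_equal_inList : Prop := ∀ (strnum : String), Dom_inList strnum → Spec_inList strnum (inList strnum)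

-- ===== LEMMAS AND PROOFS =====

-- characterisation of A's loop: with a duplicate-free pool L it accepts exactly
-- the duplicate-free strings drawn from L
theorem inListLoopA_iff (cs L : List Char) (hL : L.Nodup) :
    inListLoopA cs L = true ↔ cs.Nodup ∧ ∀ c ∈ cs, c ∈ L := by
  induction cs generalizing L with
  | nil => simp [inListLoopA]
  | cons c rest ih =>
    simp only [inListLoopA]
    by_cases hc : c ∈ L
    · rw [if_pos (by simpa using hc), PySem.List.remove?_eq_some_erase _ _ hc]
      simp only [Option.getD_some]
      rw [ih _ (hL.erase c)]
      simp only [List.nodup_cons, List.mem_cons]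
      constructor
      · rintro ⟨hnd, hsub⟩
        refine ⟨⟨fun hmem => ((hL.mem_erase_iff).1 (hsub c hmem)).1 rfl, hnd⟩, ?_⟩
        rintro x (rfl | hx)
        · exact hc
        · exact ((hL.mem_erase_iff).1 (hsub x hx)).2
      · rintro ⟨⟨hcn, hnd⟩, hsub⟩
        refine ⟨hnd, fun x hx => (hL.mem_erase_iff).2 ⟨fun he => hcn (he ▸ hx), hsub x (Or.inr hx)⟩⟩
    · rw [if_neg (by simpa using hc)]
      constructor
      · intro h; simp at h
      · rintro ⟨_, h⟩
        exact absurd (h c (by simp)) hc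

-- (ofList l).length = l.length exactly for duplicate-free l
theorem length_ofList_eq_iff (l : List Char) :
    (PySem.Set.ofList l).length = l.length ↔ l.Nodup := by
  constructor
  · intro h
    induction l with
    | nil => simp
    | cons x xs ih =>
      rw [PySem.Set.ofList_cons] at h
      simp only [List.length_cons] at h
      have hdle : (PySem.Set.discard (PySem.Set.ofList xs) x).length ≤ (PySem.Set.ofList xs).length := by
        simp [PySem.Set.discard, List.length_filter_le]
      have hofle : (PySem.Set.ofList xs).length ≤ xs.length := PySem.Set.length_ofList_le xs
      have hof : (PySem.Set.ofList xs).length = xs.length := by omega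
      have hxs : xs.Nodup := ih hof
      rw [List.nodup_cons]
      refine ⟨fun hx => ?_, hxs⟩
      -- if x ∈ xs then discard strictly shrinks ofList xs, contradicting the lengths
      have hxof : x ∈ PySem.Set.ofList xs := (PySem.Set.mem_ofList _ _).2 hx
      have : (PySem.Set.discard (PySem.Set.ofList xs) x).length < (PySem.Set.ofList xs).length := by
        simp only [PySem.Set.discard]
        exact List.length_filter_lt_length_iff_exists.2 ⟨x, hxof, by simp⟩
      omega
  · intro h
    rw [PySem.Set.ofList_eq_self_of_nodup _ h]

-- ===== VERDICT (by name: the statement is the Claim_ definition above) =====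
theorem inList_spec : Claim_equal_inList := by
  intro s _
  show inList s = inList_alt s
  have hdig : (['1','2','3','4','5','6','7','8','9'] : List Char).Nodup := by decide
  rw [Bool.eq_iff_iff]
  rw [inList, inListLoopA_iff _ _ hdig]
  simp only [inList_alt, Bool.and_eq_true, beq_iff_eq, PySem.Set.issubset_iff,
    PySem.Set.len, PySem.Str.len]
  constructor
  · rintro ⟨hnd, hsub⟩
    refine ⟨fun x hx => (PySem.Set.mem_ofList _ _).2 (hsub x ((PySem.Set.mem_ofList _ _).1 hx)), ?_⟩
    rw [PySem.Set.ofList_eq_self_of_nodup _ hnd]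
  · rintro ⟨hsub, hlen⟩
    have hnd : s.toList.Nodup := (length_ofList_eq_iff s.toList).1 (by exact_mod_cast hlen)
    exact ⟨hnd, fun c hc => (PySem.Set.mem_ofList _ _).1 (hsub c ((PySem.Set.mem_ofList _ _).2 hc))⟩
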